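-- pv_equiv track=rewrite | github.com/builtbyai/Admin | combine_md_to_wiki_local.py | create_keyword_index
-- ===== SOURCE A (Python) =====
-- def create_keyword_index(keywords):
--     """Create keyword index"""
--     index = "\n\n## Keyword Index\n\n"
--     index += "Most frequently used terms in this knowledge base:\n\n"
--
--     # Group by first letter
--     grouped = {}
--     for keyword in sorted(keywords[:50]):  # Top 50 keywords
--         first_letter = keyword[0].upper()
--         if first_letter not in grouped:
--             grouped[first_letter] = []
--         grouped[first_letter].append(keyword)
--
--     # Create columns
--     for letter, words in sorted(grouped.items()):
--         index += f"**{letter}**: "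
--         index += ", ".join(words)
--         index += "\n\n"
--
--     return index
-- ===== SOURCE B (Python) =====
-- def create_keyword_index(keywords):
--     """Create keyword index"""
--     ordered = sorted(keywords[:50], key=lambda w: w[0].upper() + w)
--     parts = ["\n\n## Keyword Index\n\n",
--              "Most frequently used terms in this knowledge base:\n\n"]
--     i, n = 0, len(ordered)
--     while i < n:
--         letter = ordered[i][0].upper()
--         j = i
--         while j < n and ordered[j][0].upper() == letter:
--             j += 1
--         parts.append("**" + letter + "**: " + ", ".join(ordered[i:j]) + "\n\n")
--         i = j
--     return "".join(parts)
-- ===== Notes on version B (the rewrite author's own statement) =====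
-- stated objective: alternative
-- what changed: Replaces the dict-accumulation pass plus a second sort of the dict items by a single sort under the composite key w[0].upper() + w followed by one adjacent-run grouping scan that emits each letter's block directly, with no intermediate dict.
import Mathlib
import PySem

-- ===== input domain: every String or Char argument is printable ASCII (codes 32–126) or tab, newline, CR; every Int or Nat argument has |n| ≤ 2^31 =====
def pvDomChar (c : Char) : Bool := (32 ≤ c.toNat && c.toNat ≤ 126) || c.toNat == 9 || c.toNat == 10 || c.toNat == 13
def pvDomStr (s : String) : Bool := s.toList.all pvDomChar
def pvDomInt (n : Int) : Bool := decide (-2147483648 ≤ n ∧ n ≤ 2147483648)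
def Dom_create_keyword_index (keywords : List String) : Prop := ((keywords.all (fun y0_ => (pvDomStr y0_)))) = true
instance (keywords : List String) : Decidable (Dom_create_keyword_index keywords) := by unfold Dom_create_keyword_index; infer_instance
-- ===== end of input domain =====

-- B replaces A's dict accumulation + item re-sort by ONE composite-key sort (w[0].upper() + w)
-- followed by a single adjacent-grouping scan (alternative decomposition, no dict).

-- shared tiny helper: keyword[0].upper() as a Char (exact on the ASCII domain; Python's
-- single-char string key compares exactly like its Char)
def pvUpper1 (c : Char) : Char := (PySem.Chars.upper [c]).headD c
def pvFirstUpper (w : String) : Char := pvUpper1 (PySem.List.pyGetD w.toList 0 ' ')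
def pvHeaderChars : List Char := ("\n\n## Keyword Index\n\nMost frequently used terms in this knowledge base:\n\n").toList

-- ===== PORT A =====
def create_keyword_index (keywords : List String) : String :=
  let top := PySem.List.sorted (PySem.List.slice keywords none (some 50)) (fun w => w)
  -- 'if first_letter not in grouped: grouped[first_letter] = []; grouped[first_letter].append(keyword)'
  -- is exactly d[k] = d.get(k, []) + [keyword], i.e. Dict.modify
  let grouped : PySem.Dict Char (List String) :=
    top.foldl (fun d w => d.modify (pvFirstUpper w) [] (fun ws => ws ++ [w])) PySem.Dict.empty
  -- sorted(grouped.items()): dict keys are unique, so Python's tuple comparison never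
  -- reaches the second component — sorting by the key alone is exact here
  let items := PySem.List.sorted grouped.items (fun p => p.1)
  let body := items.foldl (fun acc p =>
      acc ++ ('*' :: '*' :: p.1 :: '*' :: '*' :: ':' :: ' ' :: [])
          ++ PySem.Chars.join (", ".toList) (p.2.map String.toList)
          ++ ('\n' :: '\n' :: [])) pvHeaderChars
  String.ofList body

-- ===== PORT B =====
-- the composite sort key w[0].upper() + w (a one-char string prepended to w; exact as chars)
def pvKeyB (w : String) : String := String.ofList (pvFirstUpper w :: w.toList)

-- one emitted block  "**letter**: " + ", ".join(group) + "\n\n"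
def pvBlock (L : Char) (grp : List String) : List Char :=
  ('*' :: '*' :: L :: '*' :: '*' :: ':' :: ' ' :: [])
    ++ PySem.Chars.join (", ".toList) (grp.map String.toList)
    ++ ('\n' :: '\n' :: [])

-- the outer while loop: the inner 'while j < n and …' scan of the run starting at i is
-- takeWhile, and 'i = j' continues after that run, i.e. on dropWhile
def pvScanBlocks : List String → List (List Char)
  | [] => []
  | w :: t =>
    pvBlock (pvFirstUpper w) ((w :: t).takeWhile (fun v => pvFirstUpper v == pvFirstUpper w))
      :: pvScanBlocks ((w :: t).dropWhile (fun v => pvFirstUpper v == pvFirstUpper w))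
termination_by s => s.length
decreasing_by
  simp only [List.dropWhile_cons, beq_self_eq_true, if_true]
  exact Nat.lt_succ_of_le (List.length_dropWhile_le _ _)

def create_keyword_index_alt (keywords : List String) : String :=
  let ordered := PySem.List.sorted (PySem.List.slice keywords none (some 50)) pvKeyB
  -- ''.join(parts): the two header strings followed by the emitted blocks
  String.ofList (pvHeaderChars ++ (pvScanBlocks ordered).flatten)

-- ===== PRECONDITION & SPEC =====
-- Pre_ excludes inputs where some keyword among the first 50 is empty: there Python's keyword[0] raises IndexError (both A and B raise).
def Pre_create_keyword_index (keywords : List String) : Prop := ∀ w ∈ keywords.take 50, w ≠ ""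
instance (keywords : List String) : Decidable (Pre_create_keyword_index keywords) := by unfold Pre_create_keyword_index; infer_instance
def pvWitness_create_keyword_index : List String := ["banana", "Apple", "cherry", "avocado"]
def Spec_create_keyword_index (keywords : List String) (out : String) : Prop := out = create_keyword_index_alt keywords
instance (keywords : List String) (out : String) : Decidable (Spec_create_keyword_index keywords out) := by unfold Spec_create_keyword_index; infer_instance

-- ===== CLAIM (what is proved, stated in full; the proofs are below) =====
def Claim_equal_create_keyword_index : Prop := ∀ (keywords : List String), Dom_create_keyword_index keywords → Pre_create_keyword_index keywords → Spec_create_keyword_index keywords (create_keyword_index keywords)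

-- ===== LEMMAS AND PROOFS =====

-- the common canonical form: one block per sorted distinct first letter, filled by filtering s
def pvCanon (s : List String) : List (List Char) :=
  (PySem.List.sorted (PySem.Set.ofList (s.map pvFirstUpper)) (fun c => c)).map
    (fun L => pvBlock L (s.filter (fun w => pvFirstUpper w == L)))

-- the grouped dict's value at any key c is the filter of the sorted list by first letter
theorem pv_getD_grouped (s : List String) (c : Char) :
    (s.foldl (fun d w => d.modify (pvFirstUpper w) [] (fun ws => ws ++ [w]))
        (PySem.Dict.empty : PySem.Dict Char (List String))).getD c []
      = s.filter (fun w => pvFirstUpper w == c) := by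
  have h : s.foldl (fun d w => d.modify (pvFirstUpper w) [] (fun ws => ws ++ [w]))
        (PySem.Dict.empty : PySem.Dict Char (List String))
      = (s.map (fun w => (pvFirstUpper w, w))).foldl
          (fun d p => d.modify p.1 [] (fun ws => ws ++ [p.2])) PySem.Dict.empty := by
    rw [List.foldl_map]
  rw [h, PySem.Dict.getD_foldl_modify_append]
  simp [List.filter_map, Function.comp_def, PySem.Dict.getD_empty]

-- A's sorted item list is the per-letter table over the sorted distinct first letters
theorem pv_items_sorted (s : List String) :
    PySem.List.sorted
        (s.foldl (fun d w => d.modify (pvFirstUpper w) [] (fun ws => ws ++ [w]))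
          (PySem.Dict.empty : PySem.Dict Char (List String))).items (fun p => p.1)
      = (PySem.List.sorted (PySem.Set.ofList (s.map pvFirstUpper)) (fun c => c)).map
          (fun L => (L, s.filter (fun w => pvFirstUpper w == L))) := by
  set D := s.foldl (fun d w => d.modify (pvFirstUpper w) [] (fun ws => ws ++ [w]))
          (PySem.Dict.empty : PySem.Dict Char (List String)) with hD
  set letters := PySem.List.sorted (PySem.Set.ofList (s.map pvFirstUpper)) (fun c => c) with hl
  have hknd : D.keys.Nodup := by
    exact PySem.Dict.nodup_keys_foldl_modify_key s pvFirstUpper []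
      (fun _ w => fun ws => ws ++ [w]) PySem.Dict.empty PySem.Dict.nodup_keys_empty
  have hkeys : D.keys = PySem.Set.ofList (s.map pvFirstUpper) := by
    rw [hD, PySem.Dict.keys_foldl_modify_key, PySem.Dict.keys_empty, PySem.Set.update_nil_left]
  have hitems : D.items = D.keys.map (fun L => (L, s.filter (fun w => pvFirstUpper w == L))) := by
    rw [PySem.Dict.items_eq_map_keys D hknd []]
    refine List.map_congr_left ?_
    intro k _
    rw [hD, pv_getD_grouped]
  have hpermL : letters.Perm D.keys := by
    rw [hkeys]; exact PySem.List.sorted_perm _ _ false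
  have hperm : (letters.map (fun L => (L, s.filter (fun w => pvFirstUpper w == L)))).Perm D.items := by
    rw [hitems]; exact hpermL.map _
  have hnd : letters.Nodup := (hpermL.nodup_iff).mpr hknd
  have hle : letters.Pairwise (fun a b => a ≤ b) := PySem.List.sorted_pairwise _ (fun c => c)
  have hlt : letters.Pairwise (fun a b => a < b) := by
    refine (hle.and hnd).imp ?_
    rintro a b ⟨h1, h2⟩
    exact lt_of_le_of_ne h1 h2
  have hpw : (letters.map (fun L => (L, s.filter (fun w => pvFirstUpper w == L)))).Pairwise
      (fun a b => a.1 < b.1) := List.pairwise_map.mpr hlt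
  exact PySem.List.sorted_eq_of_perm_of_pairwise_lt _ _ _ hperm hpw

-- A in canonical form
theorem pv_A_canon (keywords : List String) :
    create_keyword_index keywords
      = String.ofList (pvHeaderChars
          ++ (pvCanon (PySem.List.sorted (PySem.List.slice keywords none (some 50)) (fun w => w))).flatten) := by
  simp only [create_keyword_index]
  rw [pv_items_sorted]
  simp only [List.append_assoc]
  rw [PySem.List.foldl_append_eq_flatMap]
  simp [pvCanon, pvBlock, Function.comp_def, List.flatMap_def]

-- the composite key orders first letters: pvKeyB a ≤ pvKeyB b → letter a ≤ letter b
theorem pv_key_le_letter {a b : String} (h : pvKeyB a ≤ pvKeyB b) :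
    pvFirstUpper a ≤ pvFirstUpper b := by
  rw [pvKeyB, pvKeyB, String.le_iff_toList_le] at h
  simp only [String.toList_ofList] at h
  rw [le_iff_lt_or_eq] at h
  rcases h with h | h
  · rcases List.cons_lt_cons_iff.mp h with h1 | ⟨h1, _⟩
    · exact le_of_lt h1
    · exact le_of_eq h1
  · injection h with h1 _
    exact le_of_eq h1

-- within one letter the composite key orders the words themselves
theorem pv_key_le_word {a b : String} (h : pvKeyB a ≤ pvKeyB b)
    (hab : pvFirstUpper a = pvFirstUpper b) : a ≤ b := by
  rw [pvKeyB, pvKeyB, String.le_iff_toList_le] at h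
  simp only [String.toList_ofList, hab] at h
  rw [String.le_iff_toList_le]
  rw [le_iff_lt_or_eq] at h
  rcases h with h | h
  · rcases List.cons_lt_cons_iff.mp h with h1 | ⟨_, h2⟩
    · exact absurd h1 (lt_irrefl _)
    · exact le_of_lt h2
  · injection h with _ h2
    exact le_of_eq h2

-- every element dropped by the run scan has a different first letter
theorem pv_dropWhile_ne {s : List String} {L : Char}
    (hpw : s.Pairwise (fun a b => pvFirstUpper a ≤ pvFirstUpper b))
    (hmin : ∀ x ∈ s, L ≤ pvFirstUpper x) :
    ∀ x ∈ s.dropWhile (fun v => pvFirstUpper v == L), pvFirstUpper x ≠ L := by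
  induction s with
  | nil => intro x hx; simp [List.dropWhile] at hx
  | cons w t ih =>
    intro x hx
    by_cases hw : pvFirstUpper w == L
    · rw [List.dropWhile_cons, if_pos hw] at hx
      exact ih hpw.of_cons (fun y hy => hmin y (List.mem_cons_of_mem _ hy)) x hx
    · rw [List.dropWhile_cons, if_neg hw] at hx
      rcases List.mem_cons.mp hx with rfl | hx
      · exact fun hc => hw (beq_iff_eq.mpr hc)
      · intro hc
        have h1 : pvFirstUpper w ≤ pvFirstUpper x := List.rel_of_pairwise_cons hpw hx
        have h2 : L ≤ pvFirstUpper w := hmin w (List.mem_cons_self)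
        exact hw (beq_iff_eq.mpr (le_antisymm (hc ▸ h1) h2))

-- the scan equals the canonical per-letter table on letter-sorted input
theorem pv_scan_canon (s : List String)
    (hpw : s.Pairwise (fun a b => pvFirstUpper a ≤ pvFirstUpper b)) :
    pvScanBlocks s = pvCanon s := by
  induction s using pvScanBlocks.induct with
  | case1 => simp [pvScanBlocks, pvCanon, PySem.Set.ofList, PySem.List.sorted]
  | case2 w t ih =>
    set L := pvFirstUpper w with hL
    set grp := (w :: t).takeWhile (fun v => pvFirstUpper v == L) with hgrp
    set rest := (w :: t).dropWhile (fun v => pvFirstUpper v == L) with hrest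
    have hmin : ∀ x ∈ (w :: t), L ≤ pvFirstUpper x := by
      intro x hx
      rcases List.mem_cons.mp hx with rfl | hx
      · exact le_refl _
      · exact List.rel_of_pairwise_cons hpw hx
    have hne : ∀ x ∈ rest, pvFirstUpper x ≠ L := pv_dropWhile_ne hpw hmin
    have hrpw : rest.Pairwise (fun a b => pvFirstUpper a ≤ pvFirstUpper b) :=
      hpw.sublist (List.dropWhile_sublist _)
    have hgl : ∀ x ∈ grp, pvFirstUpper x = L := by
      intro x hx
      exact beq_iff_eq.mp (List.mem_takeWhile_imp (p := fun v => pvFirstUpper v == L) hx)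
    have hsplit : (w :: t) = grp ++ rest := (List.takeWhile_append_dropWhile).symm
    -- filter by L is the run
    have hfL : (w :: t).filter (fun v => pvFirstUpper v == L) = grp := by
      rw [hsplit, List.filter_append]
      have h1 : grp.filter (fun v => pvFirstUpper v == L) = grp :=
        List.filter_eq_self.mpr (fun x hx => beq_iff_eq.mpr (hgl x hx))
      have h2 : rest.filter (fun v => pvFirstUpper v == L) = [] :=
        List.filter_eq_nil_iff.mpr (fun x hx => by simp [hne x hx])
      rw [h1, h2, List.append_nil]
    -- filter by any other letter ignores the run
    have hfO : ∀ c, c ≠ L → (w :: t).filter (fun v => pvFirstUpper v == c)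
        = rest.filter (fun v => pvFirstUpper v == c) := by
      intro c hc
      rw [hsplit, List.filter_append]
      have h1 : grp.filter (fun v => pvFirstUpper v == c) = [] :=
        List.filter_eq_nil_iff.mpr (fun x hx => by simp [hgl x hx, hc.symm])
      rw [h1, List.nil_append]
    -- sorted distinct letters of s = L :: sorted distinct letters of rest
    have hletters : PySem.List.sorted (PySem.Set.ofList ((w :: t).map pvFirstUpper)) (fun c => c)
        = L :: PySem.List.sorted (PySem.Set.ofList (rest.map pvFirstUpper)) (fun c => c) := by
      have hLlt : ∀ c ∈ PySem.List.sorted (PySem.Set.ofList (rest.map pvFirstUpper)) (fun c => c), L < c := by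
        intro c hc
        have hc' : c ∈ rest.map pvFirstUpper := by
          rw [PySem.List.mem_sorted, PySem.Set.mem_ofList] at hc; exact hc
        rcases List.mem_map.mp hc' with ⟨x, hx, rfl⟩
        have hxs : x ∈ (w :: t) := (List.dropWhile_sublist _).mem hx
        exact lt_of_le_of_ne (hmin x hxs) (fun hc => (hne x hx) hc.symm)
      have hnd2 : (L :: PySem.List.sorted (PySem.Set.ofList (rest.map pvFirstUpper)) (fun c => c)).Pairwise
          (fun a b => a < b) := by
        refine List.pairwise_cons.mpr ⟨hLlt, ?_⟩
        exact PySem.List.sorted_ofList_pairwise_lt _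
      refine PySem.List.sorted_eq_of_perm_of_pairwise_lt _ _ _ ?_ hnd2
      refine (List.perm_ext_iff_of_nodup ?_ ?_).mpr ?_
      · refine List.nodup_cons.mpr ⟨?_, ?_⟩
        · intro hc; exact lt_irrefl L (hLlt L hc)
        · exact ((PySem.List.sorted_perm _ _ false).nodup_iff).mpr (PySem.Set.nodup_ofList _)
      · exact PySem.Set.nodup_ofList _
      · intro c
        simp only [List.mem_cons, PySem.List.mem_sorted, PySem.Set.mem_ofList]
        constructor
        · rintro (rfl | hc)
          · exact List.mem_map.mpr ⟨w, List.mem_cons_self, rfl⟩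
          · rcases List.mem_map.mp hc with ⟨x, hx, rfl⟩
            exact List.mem_map.mpr ⟨x, (List.dropWhile_sublist _).mem hx, rfl⟩
        · intro hc
          rcases List.mem_map.mp hc with ⟨x, hx, rfl⟩
          by_cases hxL : pvFirstUpper x = L
          · exact Or.inl hxL
          · right
            have hxr : x ∈ rest := by
              rw [hsplit] at hx
              rcases List.mem_append.mp hx with hx | hx
              · exact absurd (hgl x hx) hxL
              · exact hx
            exact List.mem_map.mpr ⟨x, hxr, rfl⟩
    rw [pvScanBlocks, ih hrpw]
    unfold pvCanon
    rw [hletters, List.map_cons, hfL]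
    refine congrArg₂ List.cons rfl ?_
    refine List.map_congr_left ?_
    intro c hc
    have hc' : c ∈ rest.map pvFirstUpper := by
      rw [PySem.List.mem_sorted, PySem.Set.mem_ofList] at hc; exact hc
    rcases List.mem_map.mp hc' with ⟨x, hx, rfl⟩
    rw [hfO _ (hne x hx)]

-- the per-letter filters of the composite-sorted and the plain-sorted list agree
theorem pv_filters_eq (top : List String) (L : Char) :
    (PySem.List.sorted top pvKeyB).filter (fun w => pvFirstUpper w == L)
      = (PySem.List.sorted top (fun w => w)).filter (fun w => pvFirstUpper w == L) := by
  let cs := PySem.List.sorted top pvKeyB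
  let ts := PySem.List.sorted top (fun w => w)
  have hperm : (cs.filter (fun w => pvFirstUpper w == L)).Perm
      (ts.filter (fun w => pvFirstUpper w == L)) :=
    ((PySem.List.sorted_perm _ _ false).trans (PySem.List.sorted_perm _ _ false).symm).filter _
  have hpc : (cs.filter (fun w => pvFirstUpper w == L)).Pairwise (fun a b => a ≤ b) := by
    have h0 : cs.Pairwise (fun a b => pvKeyB a ≤ pvKeyB b) := PySem.List.sorted_pairwise _ _
    refine List.Pairwise.imp_of_mem ?_ (h0.filter _)
    intro a b ha hb hk
    have ha' : pvFirstUpper a = L := by simpa using (List.mem_filter.mp ha).2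
    have hb' : pvFirstUpper b = L := by simpa using (List.mem_filter.mp hb).2
    exact pv_key_le_word hk (ha'.trans hb'.symm)
  have hpt : (ts.filter (fun w => pvFirstUpper w == L)).Pairwise (fun a b => a ≤ b) :=
    (PySem.List.sorted_pairwise _ _).filter _
  exact PySem.List.eq_of_perm_of_pairwise_le_of_injective (fun x => x)
    (fun _ _ h => h) hperm hpc hpt

-- the sorted distinct letters of the two sorts agree
theorem pv_letters_eq (top : List String) :
    PySem.List.sorted (PySem.Set.ofList ((PySem.List.sorted top pvKeyB).map pvFirstUpper)) (fun c => c)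
      = PySem.List.sorted (PySem.Set.ofList ((PySem.List.sorted top (fun w => w)).map pvFirstUpper)) (fun c => c) := by
  have hperm : ((PySem.List.sorted top pvKeyB).map pvFirstUpper).Perm
      ((PySem.List.sorted top (fun w => w)).map pvFirstUpper) :=
    ((PySem.List.sorted_perm _ _ false).trans (PySem.List.sorted_perm _ _ false).symm).map _
  have hsets : (PySem.Set.ofList ((PySem.List.sorted top pvKeyB).map pvFirstUpper)).Perm
      (PySem.Set.ofList ((PySem.List.sorted top (fun w => w)).map pvFirstUpper)) := by
    refine (List.perm_ext_iff_of_nodup (PySem.Set.nodup_ofList _) (PySem.Set.nodup_ofList _)).mpr ?_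
    intro c
    rw [PySem.Set.mem_ofList, PySem.Set.mem_ofList]
    exact ⟨fun h => hperm.mem_iff.mp h, fun h => hperm.mem_iff.mpr h⟩
  exact PySem.List.sorted_eq_sorted_of_perm _ _ _ (fun _ _ h => h) hsets

-- the composite sort orders the first letters
theorem pv_letter_pairwise (xs : List String) :
    (PySem.List.sorted xs pvKeyB).Pairwise (fun a b => pvFirstUpper a ≤ pvFirstUpper b) := by
  have h0 : (PySem.List.sorted xs pvKeyB).Pairwise (fun a b => pvKeyB a ≤ pvKeyB b) :=
    PySem.List.sorted_pairwise _ _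
  exact h0.imp (fun h => pv_key_le_letter h)

-- ===== VERDICT (by name: the statement is the Claim_ definition above) =====
theorem create_keyword_index_spec : Claim_equal_create_keyword_index := by
  intro keywords _ _
  unfold Spec_create_keyword_index
  rw [pv_A_canon]
  simp only [create_keyword_index_alt]
  rw [pv_scan_canon _ (pv_letter_pairwise _)]
  unfold pvCanon
  rw [pv_letters_eq]
  have hmap : List.map
        (fun L => pvBlock L ((PySem.List.sorted (PySem.List.slice keywords none (some 50)) pvKeyB).filter
          (fun w => pvFirstUpper w == L)))
        (PySem.List.sorted (PySem.Set.ofList ((PySem.List.sorted (PySem.List.slice keywords none (some 50)) (fun w => w)).map pvFirstUpper)) (fun c => c))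
      = List.map
        (fun L => pvBlock L ((PySem.List.sorted (PySem.List.slice keywords none (some 50)) (fun w => w)).filter
          (fun w => pvFirstUpper w == L)))
        (PySem.List.sorted (PySem.Set.ofList ((PySem.List.sorted (PySem.List.slice keywords none (some 50)) (fun w => w)).map pvFirstUpper)) (fun c => c)) :=
    List.map_congr_left (fun c _ => by rw [pv_filters_eq])
  rw [hmap]
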